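/- GENERATED by c/gen_decode.py: decode facts of the image, one per distinct instruction byte string. -/
import UserX.DecodeImage

#decode_all Gif.Dec
  "09c5"  -- or ebp,eax
  "0f842b010000"  -- je 109db8
  "0f847c010000"  -- je 10a923
  "0f84b3000000"  -- je 107c24
  "0f84fefeffff"  -- je 106f43
  "0f87f8000000"  -- ja 1062fd
  "0f8f82feffff"  -- jg 10a7d4
  "0f95c0"  -- setne al
  "0fb613"  -- movzx edx,BYTE PTR [rbx]
  "0fb66b01"  -- movzx ebp,BYTE PTR [rbx+0x1]
  "29e8"  -- sub eax,ebp
  "3c21"  -- cmp al,0x21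
  "400fb6ed"  -- movzx ebp,bpl
  "410fb6d6"  -- movzx edx,r14b
  "4181fcff0f0000"  -- cmp r12d,0xfff
  "4183e507"  -- and r13d,0x7
  "41890424"  -- mov DWORD PTR [r12],eax
  "41896c2408"  -- mov DWORD PTR [r12+0x8],ebp
  "4189d6"  -- mov r14d,edx
  "418b460c"  -- mov eax,DWORD PTR [r14+0xc]
  "418b742404"  -- mov esi,DWORD PTR [r12+0x4]
  "41bc01000000"  -- mov r12d,0x1
  "41c644245800"  -- mov BYTE PTR [r12+0x58],0x0
  "41c7450002000000"  -- mov DWORD PTR [r13+0x0],0x2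
  "41c7456070000000"  -- mov DWORD PTR [r13+0x60],0x70
  "41c784240800c0000000f3f3"  -- mov DWORD PTR [r12+0xc00008],0xf3f30000
  "41d3e6"  -- shl r14d,cl
  "440fb67c2420"  -- movzx r15d,BYTE PTR [rsp+0x20]
  "4439f5"  -- cmp ebp,r14d
  "44896314"  -- mov DWORD PTR [rbx+0x14],r12d
  "4489e0"  -- mov eax,r12d
  "4489ed"  -- mov ebp,r13d
  "4489fe"  -- mov esi,r15d
  "448b742428"  -- mov r14d,DWORD PTR [rsp+0x28]
  "448d6d01"  -- lea r13d,[rbp+0x1]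
  "4539f4"  -- cmp r12d,r14d
  "45882c24"  -- mov BYTE PTR [r12],r13b
  "45896500"  -- mov DWORD PTR [r13+0x0],r12d
  "458b2c24"  -- mov r13d,DWORD PTR [r12]
  "48036b48"  -- add rbp,QWORD PTR [rbx+0x48]
  "4839c3"  -- cmp rbx,rax
  "4863c5"  -- movsxd rax,ebp
  "4881c498000000"  -- add rsp,0x98
  "4883c428"  -- add rsp,0x28
  "4883ec40"  -- sub rsp,0x40
  "48894330"  -- mov QWORD PTR [rbx+0x30],rax
  "4889742418"  -- mov QWORD PTR [rsp+0x18],rsi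
  "4889e3"  -- mov rbx,rsp
  "488b442418"  -- mov rax,QWORD PTR [rsp+0x18]
  "488b5d58"  -- mov rbx,QWORD PTR [rbp+0x58]
  "488b7320"  -- mov rsi,QWORD PTR [rbx+0x20]
  "488b7b48"  -- mov rdi,QWORD PTR [rbx+0x48]
  "488d1cc3"  -- lea rbx,[rbx+rax*8]
  "488d542430"  -- lea rdx,[rsp+0x30]
  "488d7304"  -- lea rsi,[rbx+0x4]
  "488d742440"  -- lea rsi,[rsp+0x40]
  "488d7b0c"  -- lea rdi,[rbx+0xc]
  "488d7b2c"  -- lea rdi,[rbx+0x2c]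
  "488d7b68"  -- lea rdi,[rbx+0x68]
  "488d7d28"  -- lea rdi,[rbp+0x28]
  "488d7f20"  -- lea rdi,[rdi+0x20]
  "48bab301000000010000"  -- movabs rdx,0x100000001b3
  "48c7432800000000"  -- mov QWORD PTR [rbx+0x28],0x0
  "48c744240840161400"  -- mov QWORD PTR [rsp+0x8],0x141640
  "48c744241000000000"  -- mov QWORD PTR [rsp+0x10],0x0
  "48c744241080a61000"  -- mov QWORD PTR [rsp+0x10],0x10a680
  "48c7442420008e1000"  -- mov QWORD PTR [rsp+0x20],0x108e00
  "48c7453000000000"  -- mov QWORD PTR [rbp+0x30],0x0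
  "4901c4"  -- add r12,rax
  "4963c4"  -- movsxd rax,r12d
  "4963fc"  -- movsxd rdi,r12d
  "49895c2430"  -- mov QWORD PTR [r12+0x30],rbx
  "4989e6"  -- mov r14,rsp
  "498b742418"  -- mov rsi,QWORD PTR [r12+0x18]
  "498d4758"  -- lea rax,[r15+0x58]
  "498d7c2418"  -- lea rdi,[r12+0x18]
  "498d7c2448"  -- lea rdi,[r12+0x48]
  "498d7d60"  -- lea rdi,[r13+0x60]
  "498d7e28"  -- lea rdi,[r14+0x28]
  "49c1ed03"  -- shr r13,0x3
  "49c7870000c00000000000"  -- mov QWORD PTR [r15+0xc00000],0x0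
  "4c0fafe8"  -- imul r13,rax
  "4c896b40"  -- mov QWORD PTR [rbx+0x40],r13
  "4c897d48"  -- mov QWORD PTR [rbp+0x48],r15
  "4c8b3b"  -- mov r15,QWORD PTR [rbx]
  "4c8b6b70"  -- mov r13,QWORD PTR [rbx+0x70]
  "4c8b7570"  -- mov r14,QWORD PTR [rbp+0x70]
  "4c8d2c40"  -- lea r13,[rax+rax*2]
  "4d036610"  -- add r12,QWORD PTR [r14+0x10]
  "4d896c2438"  -- mov QWORD PTR [r12+0x38],r13
  "4d8dae58210000"  -- lea r13,[r14+0x2158]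
  "740a"  -- je 10a9e7
  "7423"  -- je 1079ac
  "743c"  -- je 109583
  "7458"  -- je 108ca3
  "748c"  -- je 10a932
  "7508"  -- jne 10812b
  "7529"  -- jne 108c0e
  "757f"  -- jne 1081d1
  "787d"  -- js 108fcb
  "7e9e"  -- jle 106e05
  "7f29"  -- jg 106933
  "81faff0f0000"  -- cmp edx,0xfff
  "83c301"  -- add ebx,0x1
  "83eb01"  -- sub ebx,0x1
  "85ed"  -- test ebp,ebp
  "8944240c"  -- mov DWORD PTR [rsp+0xc],eax
  "896b10"  -- mov DWORD PTR [rbx+0x10],ebp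
  "89c8"  -- mov eax,ecx
  "89e8"  -- mov eax,ebp
  "8b431c"  -- mov eax,DWORD PTR [rbx+0x1c]
  "8b442470"  -- mov eax,DWORD PTR [rsp+0x70]
  "8b6b20"  -- mov ebp,DWORD PTR [rbx+0x20]
  "8b7510"  -- mov esi,DWORD PTR [rbp+0x10]
  "b840000000"  -- mov eax,0x40
  "ba40000000"  -- mov edx,0x40
  "be68610000"  -- mov esi,0x6168
  "c1eb18"  -- shr ebx,0x18
  "c70302000000"  -- mov DWORD PTR [rbx],0x2
  "c7431c00000000"  -- mov DWORD PTR [rbx+0x1c],0x0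
  "c7436071000000"  -- mov DWORD PTR [rbx+0x60],0x71
  "c7452800000000"  -- mov DWORD PTR [rbp+0x28],0x0
  "c7800400c00004f3f3f3"  -- mov DWORD PTR [rax+0xc00004],0xf3f3f304
  "c7850400c00003f3f3f3"  -- mov DWORD PTR [rbp+0xc00004],0xf3f3f303
  "e801dfffff"  -- call 106020
  "e80759ffff"  -- call 100720
  "e80b7fffff"  -- call 101440
  "e80ec8ffff"  -- call 106ae0
  "e81287ffff"  -- call 100640
  "e816faffff"  -- call 10a1e0
  "e81c63ffff"  -- call 100800
  "e821e9ffff"  -- call 107900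
  "e825afffff"  -- call 103800
  "e8288effff"  -- call 101520
  "e82c6cffff"  -- call 100720
  "e83071ffff"  -- call 100640
  "e831ffffff"  -- call 105240
  "e8348affff"  -- call 100800
  "e83785ffff"  -- call 100800
  "e83da8ffff"  -- call 1057c0
  "e8426bffff"  -- call 100800
  "e844fbffff"  -- call 10a460
  "e84761ffff"  -- call 1008e0
  "e849e3ffff"  -- call 108b80
  "e84f93ffff"  -- call 103800
  "e85388ffff"  -- call 100640
  "e858a1ffff"  -- call 100720
  "e85dbdffff"  -- call 103800
  "e8629effff"  -- call 100720
  "e867d1ffff"  -- call 106020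
  "e86a79ffff"  -- call 1008e0
  "e86e8dffff"  -- call 100800
  "e87381ffff"  -- call 1008e0
  "e87881ffff"  -- call 1003c0
  "e87cfcffff"  -- call 105660
  "e88477ffff"  -- call 100800
  "e889faffff"  -- call 1052e0
  "e88b6fffff"  -- call 100800
  "e89081ffff"  -- call 1008e0
  "e898f7ffff"  -- call 10a680
  "e89b8cffff"  -- call 100800
  "e8a3b4ffff"  -- call 100640
  "e8a758ffff"  -- call 100720
  "e8acaeffff"  -- call 100800
  "e8aed5ffff"  -- call 105d80
  "e8b17bffff"  -- call 1003c0
  "e8b5bbffff"  -- call 103500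
  "e8b88dffff"  -- call 100720
  "e8bb77ffff"  -- call 100800
  "e8bf69ffff"  -- call 100720
  "e8c56affff"  -- call 100800
  "e8c877ffff"  -- call 100800
  "e8cc5cffff"  -- call 100640
  "e8d18affff"  -- call 1008e0
  "e8d758ffff"  -- call 100720
  "e8dbf6ffff"  -- call 107900
  "e8df88ffff"  -- call 100800
  "e8e277ffff"  -- call 100640
  "e8e768ffff"  -- call 1008e0
  "e8ec60ffff"  -- call 100800
  "e8f0fdffff"  -- call 1052e0
  "e8f758ffff"  -- call 100720
  "e8fb63ffff"  -- call 100640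
  "e919010000"  -- jmp 106e4b
  "e93dffffff"  -- jmp 108bf5
  "e955ffffff"  -- jmp 106874
  "e97cfeffff"  -- jmp 10949a
  "e9a7000000"  -- jmp 106fea
  "e9d6feffff"  -- jmp 10af10
  "eb3d"  -- jmp 10633a
  "eb80"  -- jmp 107f07
  "ebae"  -- jmp 109d6e
  "ebc3"  -- jmp 1098a6
  "ebdc"  -- jmp 10709d
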